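-- pv_equiv track=rewrite | github.com/Uzunov-Stefan/Arithmetic_and_LZW_Coding | Arithmetic_Coding.py | cumulative_frequency
-- ===== SOURCE A (Python) =====
-- def cumulative_frequency(frequency):
--     cf = {}
--     total = 0
--     for i in range(256):
--         if i in frequency:
--             cf[i] = total
--             total += frequency[i]
--     return cf
-- ===== SOURCE B (Python) =====
-- def cumulative_frequency(frequency):
--     present = [i for i in range(256) if i in frequency]
--     f = [frequency[i] for i in present]
--     offsets = [sum(f[:k]) for k in range(len(f))]
--     return dict(zip(present, offsets))
-- ===== Notes on version B (the rewrite author's own statement) =====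
-- stated objective: alternative
-- what changed: Replaces A's single interleaved loop carrying a running total and inserting into the dict as it goes with a build-then-combine decomposition: first the ascending list of present symbols, then their frequency list, then closed-form exclusive prefix sums (sum of each proper prefix), finally zipped into a dict.
import Mathlib
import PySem

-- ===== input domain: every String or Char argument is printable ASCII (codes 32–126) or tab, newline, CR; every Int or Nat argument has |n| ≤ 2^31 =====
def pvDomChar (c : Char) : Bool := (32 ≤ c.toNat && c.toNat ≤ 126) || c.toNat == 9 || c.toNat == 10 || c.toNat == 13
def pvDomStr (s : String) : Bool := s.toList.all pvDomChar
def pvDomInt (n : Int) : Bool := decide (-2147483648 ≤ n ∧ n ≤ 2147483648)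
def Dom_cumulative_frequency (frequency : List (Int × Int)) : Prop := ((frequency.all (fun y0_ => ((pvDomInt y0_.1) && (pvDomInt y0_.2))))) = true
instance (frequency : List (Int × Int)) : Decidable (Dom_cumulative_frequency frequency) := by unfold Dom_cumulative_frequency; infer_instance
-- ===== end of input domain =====

-- B replaces A's interleaved running-total loop with a build-then-combine decomposition
-- (present symbols, their frequencies, exclusive prefix sums, zip); alternative structure, same result.

-- ===== PORT A =====
def cumulative_frequency (frequency : List (Int × Int)) : List (Int × Int) :=
  let d : PySem.Dict Int Int := PySem.Dict.mk frequency
  let r := (PySem.List.pyRange 0 256 1).foldl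
    (fun (st : PySem.Dict Int Int × Int) i =>
      if d.contains i then (st.1.insert i st.2, st.2 + d.getD i 0) else st)
    (PySem.Dict.empty, 0)
  r.1.items

-- ===== PORT B =====
def cumulative_frequency_alt (frequency : List (Int × Int)) : List (Int × Int) :=
  let d : PySem.Dict Int Int := PySem.Dict.mk frequency
  let present := (PySem.List.pyRange 0 256 1).filter (fun i => d.contains i)
  let f := present.map (fun i => d.getD i 0)
  let offsets := (PySem.List.pyRange 0 (f.length : Int) 1).map
    (fun k => (PySem.List.slice f none (some k)).sum)
  present.zip offsets

-- ===== PRECONDITION & SPEC =====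
def Spec_cumulative_frequency (frequency : List (Int × Int)) (out : List (Int × Int)) : Prop := out = cumulative_frequency_alt frequency
instance (frequency : List (Int × Int)) (out : List (Int × Int)) : Decidable (Spec_cumulative_frequency frequency out) := by unfold Spec_cumulative_frequency; infer_instance

-- ===== CLAIM (what is proved, stated in full; the proofs are below) =====
def Claim_equal_cumulative_frequency : Prop := ∀ (frequency : List (Int × Int)), Dom_cumulative_frequency frequency → Spec_cumulative_frequency frequency (cumulative_frequency frequency)

-- ===== LEMMAS AND PROOFS =====

/-- Common characterisation: the (symbol, exclusive-running-total) list over `l`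
    starting from total `t`, with value function `v`. -/
def goCF (v : Int → Int) : List Int → Int → List (Int × Int)
  | [], _ => []
  | i :: is, t => (i, t) :: goCF v is (t + v i)

/-- A's loop over a nodup list of fresh keys appends exactly `goCF`. -/
theorem foldl_insert_total_items (v : Int → Int) :
    ∀ (l : List Int) (D : PySem.Dict Int Int) (t : Int),
      l.Nodup → (∀ i ∈ l, D.contains i = false) →
      ((l.foldl (fun (st : PySem.Dict Int Int × Int) i => (st.1.insert i st.2, st.2 + v i)) (D, t)).1).items
        = D.items ++ goCF v l t := by
  intro l
  induction l with
  | nil => intro D t _ _; simp [goCF]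
  | cons i is ih =>
    intro D t hnd hfresh
    simp only [List.foldl_cons, goCF]
    rw [ih (D.insert i t) (t + v i) hnd.of_cons]
    · rw [PySem.Dict.items_insert_of_not_contains _ _ (hfresh i (by simp))]
      simp
    · intro j hj
      rw [PySem.Dict.contains_insert]
      have hne : j ≠ i := fun h => (List.nodup_cons.mp hnd).1 (h ▸ hj)
      simp [hne, hfresh j (List.mem_cons_of_mem _ hj)]

/-- B's zip of the present list with exclusive prefix sums is `goCF`. -/
theorem zip_prefix_sums_eq_goCF (v : Int → Int) :
    ∀ (l : List Int) (t : Int),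
      l.zip ((List.range l.length).map (fun k => t + ((l.map v).take k).sum)) = goCF v l t := by
  intro l
  induction l with
  | nil => intro t; simp [goCF]
  | cons i is ih =>
    intro t
    simp only [List.length_cons, List.range_succ_eq_map, List.map_cons, List.map_map,
      List.take_zero, List.sum_nil, goCF]
    rw [List.zip_cons_cons]
    congr 1
    · simp
    · rw [← ih (t + v i)]
      congr 1
      apply List.map_congr_left
      intro k _
      simp [Function.comp, List.take_succ_cons]
      ring

-- ===== VERDICT (by name: the statement is the Claim_ definition above) =====
theorem cumulative_frequency_spec : Claim_equal_cumulative_frequency := by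
  intro frequency _
  unfold Spec_cumulative_frequency cumulative_frequency cumulative_frequency_alt
  set d : PySem.Dict Int Int := PySem.Dict.mk frequency with hd
  simp only []
  -- turn A's guarded fold into a fold over the filtered list
  rw [PySem.List.foldl_if_eq_foldl_filter]
  set present := (PySem.List.pyRange 0 256 1).filter (fun i => d.contains i) with hp
  have hnd : present.Nodup := (PySem.List.nodup_pyRange_one 0 256).filter _
  rw [foldl_insert_total_items (fun i => d.getD i 0) present PySem.Dict.empty 0 hnd
      (by intro i _; simp [PySem.Dict.contains_empty])]
  simp only [PySem.Dict.empty]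
  rw [← zip_prefix_sums_eq_goCF (fun i => d.getD i 0) present 0]
  simp only [List.nil_append]
  congr 1
  -- offsets: pyRange/slice form equals range/take form
  set f := present.map (fun i => d.getD i 0) with hf
  rw [PySem.List.pyRange_one]
  simp only [Int.sub_zero, Int.toNat_natCast, List.map_map]
  have hl : f.length = present.length := by rw [hf]; exact List.length_map ..
  rw [hl]
  apply List.map_congr_left
  intro k hk
  simp only [Function.comp]
  rw [show (0 : Int) + (k : Int) = ((k : Nat) : Int) by ring]
  rw [PySem.List.slice_to_natCast]
  simp
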